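-- pv_equiv track=rewrite | github.com/shivamgarg1/myLC | 2838-maximum-coins-heroes-can-collect/2838-maximum-coins-heroes-can-collect.py | maximumCoins
-- ===== SOURCE A (Python) =====
-- from typing import List
--
-- def maximumCoins(heroes: List[int], monsters: List[int], coins: List[int]) -> List[int]:
--
--     '''
--     heroes   -   [1, 4, 2]
--     monsters -   [1, 1, 2, 3, 5 ]
--     coins    -   [2, 3, 5, 6, 4 ]
--     prefix_sum - [2, 5, 10, 16, 20]
--     '''
--
--     coin_l = len(coins)
--     monst_coin = [(monsters[i], coins[i]) for i in range(coin_l)]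
--     monst_coin = sorted(monst_coin, key = lambda x:x[0])
--     prefix_sum = [monst_coin[0][1]]
--     for i in range(1, coin_l):
--         prefix_sum.append(prefix_sum[i-1] + monst_coin[i][1])
--     res = []
--
--     def binary_search(tgt):
--         l = 0
--         r = coin_l
--         while l < r:
--             mid = l + ( r - l ) // 2
--             if monst_coin[mid][0] > tgt:
--                 r = mid
--             else:
--                 l = mid + 1
--
--         return l
--
--     for hero in heroes:
--         l = binary_search(hero)
--         if l == 0 and monst_coin[0][0] > hero:
--             res.append(0)
--         else: res.append(prefix_sum[l - 1])
--     return res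
-- ===== SOURCE B (Python) =====
-- from typing import List
--
-- def maximumCoins(heroes: List[int], monsters: List[int], coins: List[int]) -> List[int]:
--     # Sort monster/coin pairs by strength, sort heroes (with original index),
--     # then sweep both sorted lists once with a pointer and a running coin sum.
--     pairs = sorted(zip(monsters, coins), key=lambda p: p[0])
--     res = [0] * len(heroes)
--     j = 0
--     acc = 0
--     for h, i in sorted(((h, i) for i, h in enumerate(heroes)), key=lambda t: t[0]):
--         while j < len(pairs) and pairs[j][0] <= h:
--             acc += pairs[j][1]
--             j += 1
--         res[i] = acc
--     return res
-- ===== Notes on version B (the rewrite author's own statement) =====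
-- stated objective: faster
-- what changed: Replaces the prefix-sum array plus a hand-written per-hero binary search with a single merge-style sweep: heroes are sorted with their original indices and one pointer with a running coin sum walks the sorted monsters once, scattering each answer back to the hero's original position.
import Mathlib
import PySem

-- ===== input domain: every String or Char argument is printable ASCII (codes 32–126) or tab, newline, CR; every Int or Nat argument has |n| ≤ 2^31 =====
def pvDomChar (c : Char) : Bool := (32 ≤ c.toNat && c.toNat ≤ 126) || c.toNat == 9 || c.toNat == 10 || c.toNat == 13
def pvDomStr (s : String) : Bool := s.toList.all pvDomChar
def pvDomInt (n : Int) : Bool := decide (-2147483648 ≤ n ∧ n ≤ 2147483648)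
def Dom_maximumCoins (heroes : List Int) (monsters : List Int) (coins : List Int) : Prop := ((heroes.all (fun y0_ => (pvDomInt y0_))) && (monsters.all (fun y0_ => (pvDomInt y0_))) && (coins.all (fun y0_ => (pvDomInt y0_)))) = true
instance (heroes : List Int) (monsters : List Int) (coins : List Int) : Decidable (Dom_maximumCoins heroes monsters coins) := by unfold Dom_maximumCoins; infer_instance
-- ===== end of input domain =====

-- B replaces A's per-hero binary search over a prefix-sum array by one merge-style
-- sweep of the sorted heroes over the sorted monsters (measured faster by a constant factor).


-- ===== PORT A =====
-- A's inner `binary_search` while-loop, step for step (l, r are Python ints; the extra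
-- Nat argument is only a structural totality guard: it never runs out, since r - l shrinks
-- every iteration, and the loop is entered with fuel = r - l).
def binSearchA (mc : List (Int × Int)) (tgt : Int) : Nat → Int → Int → Int
  | 0, l, _ => l
  | fuel + 1, l, r =>
    if l < r then
      let mid := l + PySem.Int.floordiv (r - l) 2
      if (PySem.List.pyGetD mc mid (0, 0)).1 > tgt then
        binSearchA mc tgt fuel l mid
      else
        binSearchA mc tgt fuel (mid + 1) r
    else l

def maximumCoins (heroes : List Int) (monsters : List Int) (coins : List Int) : List Int :=
  let coin_l : Int := coins.length
  let monst_coin0 := (PySem.List.pyRange 0 coin_l 1).map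
    (fun i => (PySem.List.pyGetD monsters i 0, PySem.List.pyGetD coins i 0))
  let monst_coin := PySem.List.sorted monst_coin0 (fun x => x.1) false
  let prefix_sum := (PySem.List.pyRange 1 coin_l 1).foldl
    (fun ps i => ps ++ [PySem.List.pyGetD ps (i - 1) 0 + (PySem.List.pyGetD monst_coin i (0, 0)).2])
    [(PySem.List.pyGetD monst_coin 0 (0, 0)).2]
  heroes.foldl (fun res hero =>
    let l := binSearchA monst_coin hero coin_l.toNat 0 coin_l
    if l = 0 ∧ (PySem.List.pyGetD monst_coin 0 (0, 0)).1 > hero then res ++ [0]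
    else res ++ [PySem.List.pyGetD prefix_sum (l - 1) 0]) []

-- ===== PORT B =====
-- B's inner `while j < len(pairs) and pairs[j][0] <= h` loop (j only ever counts up, so
-- Nat; the extra fuel argument is only a structural totality guard and never runs out,
-- since the loop is entered with fuel = len(pairs) - j and j grows every iteration).
def altWhile (pairs : List (Int × Int)) (h : Int) : Nat → Nat → Int → Nat × Int
  | 0, j, acc => (j, acc)
  | fuel + 1, j, acc =>
    if hj : j < pairs.length then
      if pairs[j].1 ≤ h then altWhile pairs h fuel (j + 1) (acc + pairs[j].2)
      else (j, acc)
    else (j, acc)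

def maximumCoins_alt (heroes : List Int) (monsters : List Int) (coins : List Int) : List Int :=
  let pairs := PySem.List.sorted (monsters.zip coins) (fun p => p.1) false
  let hs := PySem.List.sorted ((PySem.List.enumerate heroes 0).map (fun p => (p.2, p.1)))
    (fun t => t.1) false
  (hs.foldl (fun st hi =>
      let w := altWhile pairs hi.1 (pairs.length - st.2.1) st.2.1 st.2.2
      (PySem.List.pySetD st.1 hi.2 w.2, w.1, w.2))
    (List.replicate heroes.length 0, 0, 0)).1

-- ===== PRECONDITION & SPEC =====
-- Pre_ excludes exactly the inputs where A raises IndexError: empty coins (monst_coin[0])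
-- and monsters shorter than coins (monsters[i] for i < len(coins)).
def Pre_maximumCoins (heroes : List Int) (monsters : List Int) (coins : List Int) : Prop :=
  coins ≠ [] ∧ coins.length ≤ monsters.length
instance (heroes : List Int) (monsters : List Int) (coins : List Int) : Decidable (Pre_maximumCoins heroes monsters coins) := by unfold Pre_maximumCoins; infer_instance
def pvWitness_maximumCoins : List Int × List Int × List Int := ([1, 4, 2], [1, 1, 2, 3, 5], [2, 3, 5, 6, 4])

def Spec_maximumCoins (heroes : List Int) (monsters : List Int) (coins : List Int) (out : List Int) : Prop := out = maximumCoins_alt heroes monsters coins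
instance (heroes : List Int) (monsters : List Int) (coins : List Int) (out : List Int) : Decidable (Spec_maximumCoins heroes monsters coins out) := by unfold Spec_maximumCoins; infer_instance

-- ===== CLAIM (what is proved, stated in full; the proofs are below) =====
def Claim_equal_maximumCoins : Prop := ∀ (heroes : List Int) (monsters : List Int) (coins : List Int), Dom_maximumCoins heroes monsters coins → Pre_maximumCoins heroes monsters coins → Spec_maximumCoins heroes monsters coins (maximumCoins heroes monsters coins)


-- ===== LEMMAS AND PROOFS =====

-- The common middle form: for each hero, the answer is the coin sum of the first
-- `pvCnt` monsters of the sorted pair list, where `pvCnt` counts monsters with strength ≤ hero.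
def pvCnt (pairs : List (Int × Int)) (h : Int) : Nat := pairs.countP (fun p => decide (p.1 ≤ h))
def pvS (pairs : List (Int × Int)) (k : Nat) : Int := ((pairs.take k).map (fun p => p.2)).sum

lemma pvCnt_le_length (pairs : List (Int × Int)) (h : Int) : pvCnt pairs h ≤ pairs.length :=
  List.countP_le_length

lemma pvCnt_mono (pairs : List (Int × Int)) {h h' : Int} (hh : h ≤ h') :
    pvCnt pairs h ≤ pvCnt pairs h' := by
  unfold pvCnt
  exact List.countP_mono_left (fun x _ hx => by
    simp only [decide_eq_true_iff] at hx ⊢; omega)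

-- in a list Pairwise-sorted by first component, the pairs with fst ≤ h are exactly the first pvCnt
lemma pvCnt_char (pairs : List (Int × Int)) (hp : pairs.Pairwise (fun a b => a.1 ≤ b.1))
    (h : Int) : ∀ i (hi : i < pairs.length), (pairs[i].1 ≤ h ↔ i < pvCnt pairs h) := by
  induction pairs with
  | nil => intro i hi; simp at hi
  | cons a t ih =>
    rw [List.pairwise_cons] at hp
    obtain ⟨ha, hp'⟩ := hp
    intro i hi
    by_cases hah : a.1 ≤ h
    · have : pvCnt (a :: t) h = pvCnt t h + 1 := by
        unfold pvCnt; rw [List.countP_cons]; simp [hah]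
      rw [this]
      cases i with
      | zero => simpa using hah
      | succ j =>
        simp only [List.getElem_cons_succ]
        rw [ih hp' j (by simpa using hi)]
        omega
    · have hz : pvCnt (a :: t) h = 0 := by
        unfold pvCnt
        rw [List.countP_eq_zero]
        intro x hx
        rcases List.mem_cons.mp hx with rfl | hxm
        · simpa using hah
        · have := ha x hxm
          simp only [decide_eq_true_iff]; omega
      rw [hz]
      cases i with
      | zero => simpa using hah
      | succ j =>
        simp only [List.getElem_cons_succ]
        constructor
        · intro hle
          have hj' : j < t.length := by simpa using hi
          have hmem : t[j]'hj' ∈ t := List.getElem_mem _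
          have := ha _ hmem
          omega
        · omega

lemma pvS_succ (pairs : List (Int × Int)) (j : Nat) (hj : j < pairs.length) :
    pvS pairs (j + 1) = pvS pairs j + pairs[j].2 := by
  unfold pvS
  rw [List.take_succ_eq_append_getElem hj, List.map_append, List.sum_append]
  simp

-- a predicate holding exactly on the first L positions has count L
lemma countP_eq_of_iff {α : Type} (xs : List α) (p : α → Bool) (L : Nat) (hL : L ≤ xs.length)
    (h : ∀ i (hi : i < xs.length), (p xs[i] = true ↔ i < L)) : xs.countP p = L := by
  conv_lhs => rw [← List.take_append_drop L xs]
  rw [List.countP_append]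
  have h1 : (xs.take L).countP p = L := by
    have hlen : (xs.take L).length = L := by simp [hL]
    have hall : ∀ a ∈ xs.take L, p a = true := by
      intro a ha
      obtain ⟨i, hi, rfl⟩ := List.mem_iff_getElem.mp ha
      rw [List.getElem_take]
      exact (h i (by simp at hi; omega)).mpr (by simp at hi; omega)
    rw [List.countP_eq_length.mpr hall, hlen]
  have h2 : (xs.drop L).countP p = 0 := by
    rw [List.countP_eq_zero]
    intro a ha
    obtain ⟨i, hi, rfl⟩ := List.mem_iff_getElem.mp ha
    rw [List.getElem_drop]
    intro hpa
    have := (h (L + i) (by simp at hi; omega)).mp hpa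
    omega
  omega

-- ---- A side ----

-- the hand-written binary search lands on pvCnt
lemma binSearchA_leaf (mc : List (Int × Int)) (tgt : Int) (l : Int) (h0 : 0 ≤ l)
    (hlen : l ≤ mc.length)
    (hL : ∀ i (hi : i < mc.length), (i : Int) < l → mc[i].1 ≤ tgt)
    (hR : ∀ i (hi : i < mc.length), l ≤ (i : Int) → tgt < mc[i].1) :
    ∀ fuel, binSearchA mc tgt fuel l l = (pvCnt mc tgt : Int) := by
  have hcnt : (pvCnt mc tgt : Int) = l := by
    have : mc.countP (fun p => decide (p.1 ≤ tgt)) = l.toNat := by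
      apply countP_eq_of_iff _ _ _ (by omega)
      intro i hi
      simp only [decide_eq_true_iff]
      constructor
      · intro hle
        by_contra hcon
        have := hR i hi (by omega)
        omega
      · intro hlt
        exact hL i hi (by omega)
    unfold pvCnt
    rw [this]
    omega
  intro fuel
  cases fuel with
  | zero => rw [hcnt]; rfl
  | succ f =>
    simp only [binSearchA]
    rw [if_neg (lt_irrefl l), hcnt]

lemma binSearchA_run (mc : List (Int × Int)) (hp : mc.Pairwise (fun a b => a.1 ≤ b.1))
    (tgt : Int) :
    ∀ (d : Nat) (l r : Int), (r - l).toNat ≤ d → 0 ≤ l → l ≤ r → r ≤ mc.length →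
    (∀ i (hi : i < mc.length), (i : Int) < l → mc[i].1 ≤ tgt) →
    (∀ i (hi : i < mc.length), r ≤ (i : Int) → tgt < mc[i].1) →
    binSearchA mc tgt d l r = (pvCnt mc tgt : Int) := by
  intro d
  induction d with
  | zero =>
    intro l r hd h0 hlr hrlen hL hR
    have hlr' : l = r := by omega
    subst hlr'
    exact binSearchA_leaf mc tgt l h0 (by omega) hL hR 0
  | succ d ih =>
    intro l r hd h0 hlr hrlen hL hR
    by_cases hlt : l < r
    · simp only [binSearchA]
      rw [if_pos hlt]
      have hfd : PySem.Int.floordiv (r - l) 2 = (r - l) / 2 :=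
        PySem.Int.floordiv_eq_ediv_of_pos (by omega)
      have hmb : l ≤ l + PySem.Int.floordiv (r - l) 2 ∧
          l + PySem.Int.floordiv (r - l) 2 < r := by rw [hfd]; omega
      set mid := l + PySem.Int.floordiv (r - l) 2 with hmid
      have hmlen : mid.toNat < mc.length := by omega
      have hget : PySem.List.pyGetD mc mid (0, 0) = mc[mid.toNat] :=
        PySem.List.pyGetD_eq_getElem mc (0, 0) (by omega) (by omega)
      simp only [hget, gt_iff_lt]
      have hpg := List.pairwise_iff_getElem.mp hp
      by_cases hc : tgt < mc[mid.toNat].1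
      · rw [if_pos hc]
        apply ih l mid (by rw [hmid, hfd] at *; omega) h0 (by omega) (by omega) hL
        intro i hi hmi
        have himid : mid.toNat ≤ i := by omega
        have hle2 : mc[mid.toNat].1 ≤ mc[i].1 := by
          rcases Nat.eq_or_lt_of_le himid with heq | hlt'
          · subst heq; exact le_refl _
          · exact hpg mid.toNat i hmlen hi hlt'
        exact lt_of_lt_of_le hc hle2
      · rw [if_neg hc]
        apply ih (mid + 1) r (by rw [hmid, hfd] at *; omega) (by omega) (by omega) hrlen
        · intro i hi hmi
          have himid : i ≤ mid.toNat := by omega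
          have hle2 : mc[i].1 ≤ mc[mid.toNat].1 := by
            rcases Nat.eq_or_lt_of_le himid with heq | hlt'
            · subst heq; exact le_refl _
            · exact hpg i mid.toNat hi hmlen hlt'
          exact le_trans hle2 (not_lt.mp hc)
        · exact hR
    · have hlr' : l = r := by omega
      subst hlr'
      exact binSearchA_leaf mc tgt l h0 (by omega) hL hR (d + 1)

-- A's index-comprehension over range(len(coins)) is zip when monsters is long enough
lemma a_pairs_eq_zip (monsters coins : List Int) (hlen : coins.length ≤ monsters.length) :
    (PySem.List.pyRange 0 (coins.length : Int) 1).map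
      (fun i => (PySem.List.pyGetD monsters i 0, PySem.List.pyGetD coins i 0)) =
      monsters.zip coins := by
  apply List.ext_getElem
  · simp [PySem.List.length_pyRange_one]
    omega
  · intro k h1 h2
    have hk : k < coins.length := by
      simp [PySem.List.length_pyRange_one] at h1; omega
    rw [List.getElem_map, PySem.List.getElem_pyRange_one, List.getElem_zip]
    simp only [zero_add]
    rw [PySem.List.pyGetD_eq_getElem monsters 0 (by omega) (by omega),
        PySem.List.pyGetD_eq_getElem coins 0 (by omega) (by omega)]
    simp

-- the prefix-sum loop builds the list of partial sums of the sorted coin values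
lemma prefixA_run (mc : List (Int × Int)) :
    ∀ (n : Nat), 1 ≤ n → n ≤ mc.length →
    (PySem.List.pyRange 1 (n : Int) 1).foldl
      (fun ps i => ps ++ [PySem.List.pyGetD ps (i - 1) 0 + (PySem.List.pyGetD mc i (0, 0)).2])
      [(PySem.List.pyGetD mc 0 (0, 0)).2] =
    (List.range n).map (fun k => pvS mc (k + 1)) := by
  intro n
  induction n with
  | zero => intro h1 _; omega
  | succ m ih =>
    intro _ hlen
    by_cases hm : 1 ≤ m
    · have hcast : ((m : Int) + 1) = ((m + 1 : Nat) : Int) := by push_cast; ring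
      rw [← hcast, PySem.List.pyRange_one_succ_right (by exact_mod_cast hm),
          List.foldl_append]
      rw [ih hm (by omega)]
      simp only [List.foldl_cons, List.foldl_nil]
      have hlen' : ((List.range m).map (fun k => pvS mc (k + 1))).length = m := by simp
      have hidx : ((m : Int) - 1) = ((m - 1 : Nat) : Int) := by push_cast [hm]; ring
      rw [hidx, PySem.List.pyGetD_eq_getElem _ 0 (by omega) (by rw [hlen']; omega)]
      rw [PySem.List.pyGetD_eq_getElem mc (0,0) (by omega) (by omega)]
      have hg : ((List.range m).map (fun k => pvS mc (k + 1)))[((m - 1 : Nat):Int).toNat]'(by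
          rw [hlen']; omega) = pvS mc m := by
        simp only [Int.toNat_natCast, List.getElem_map, List.getElem_range]
        congr 1
        omega
      rw [hg]
      simp only [Int.toNat_natCast]
      rw [← pvS_succ mc m (by omega)]
      rw [List.range_succ, List.map_append]
      simp
    · have hm0 : m = 0 := by omega
      subst hm0
      rw [Nat.cast_one, PySem.List.pyRange_one_eq_nil (by omega : (1:Int) ≤ 1)]
      simp only [List.foldl_nil]
      rw [PySem.List.pyGetD_eq_getElem mc (0, 0) (by omega) (by omega)]
      have h0 : 0 < mc.length := by omega
      have htake : mc.take 1 = [mc[0]] := by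
        cases mc with
        | nil => simp at h0
        | cons a t => simp
      have hr1 : List.range (0 + 1) = [0] := rfl
      rw [hr1]
      simp only [List.map_cons, List.map_nil]
      unfold pvS
      rw [htake]
      simp

-- A computes, for each hero in order, the coin sum of the monsters it can defeat
lemma a_eq_map (heroes monsters coins : List Int)
    (hne : coins ≠ []) (hlen : coins.length ≤ monsters.length) :
    maximumCoins heroes monsters coins =
      heroes.map (fun h =>
        pvS (PySem.List.sorted (monsters.zip coins) (fun p => p.1) false)
          (pvCnt (PySem.List.sorted (monsters.zip coins) (fun p => p.1) false) h)) := by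
  unfold maximumCoins
  simp only []
  rw [a_pairs_eq_zip monsters coins hlen]
  set mc := PySem.List.sorted (monsters.zip coins) (fun p => p.1) false with hmc
  have hp : mc.Pairwise (fun a b => a.1 ≤ b.1) := PySem.List.sorted_pairwise _ _
  have hmclen : mc.length = coins.length := by
    rw [hmc, PySem.List.length_sorted]
    simp
    omega
  have hn1 : 1 ≤ coins.length := List.length_pos_iff.mpr hne
  rw [prefixA_run mc coins.length hn1 (by omega)]
  have hbody : ∀ (res : List Int) (hero : Int),
      (let l := binSearchA mc hero ((coins.length : Int)).toNat 0 (coins.length : Int)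
       if l = 0 ∧ (PySem.List.pyGetD mc 0 (0, 0)).1 > hero then res ++ [0]
       else res ++ [PySem.List.pyGetD ((List.range coins.length).map (fun k => pvS mc (k + 1))) (l - 1) 0]) =
      res ++ [pvS mc (pvCnt mc hero)] := by
    intro res hero
    have hbs : binSearchA mc hero ((coins.length : Int)).toNat 0 (coins.length : Int) =
        (pvCnt mc hero : Int) := by
      apply binSearchA_run mc hp hero ((coins.length : Int)).toNat 0 (coins.length : Int)
        (by omega) (by omega) (by omega) (by omega)
      · intro i hi h0; omega
      · intro i hi hge
        exfalso
        rw [hmclen] at hi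
        omega
    simp only [hbs]
    have hchar := pvCnt_char mc hp hero
    by_cases hz : pvCnt mc hero = 0
    · have h0len : 0 < mc.length := by omega
      have hfirst : ¬ mc[0].1 ≤ hero := by
        intro hcon
        have := (hchar 0 h0len).mp hcon
        omega
      have hget : PySem.List.pyGetD mc 0 (0, 0) = mc[0] :=
        PySem.List.pyGetD_eq_getElem mc (0, 0) (by omega) (by omega)
      rw [if_pos]
      · have : pvS mc 0 = 0 := by unfold pvS; simp
        rw [hz, this]
      · constructor
        · omega
        · rw [hget]; omega
    · rw [if_neg]
      · have hc1 : 1 ≤ pvCnt mc hero := by omega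
        have hcle : pvCnt mc hero ≤ coins.length := by
          have := pvCnt_le_length mc hero; omega
        have hidx : ((pvCnt mc hero : Int) - 1) = ((pvCnt mc hero - 1 : Nat) : Int) := by
          push_cast [hc1]; ring
        rw [hidx, PySem.List.pyGetD_eq_getElem
          ((List.range coins.length).map (fun k => pvS mc (k + 1))) 0 (by omega)
          (by simp only [List.length_map, List.length_range]; omega)]
        simp only [Int.toNat_natCast, List.getElem_map, List.getElem_range]
        have hplus : pvCnt mc hero - 1 + 1 = pvCnt mc hero := by omega
        rw [hplus]
      · intro ⟨hcon, _⟩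
        omega
  rw [List.foldl_ext _ (fun res hero => res ++ [pvS mc (pvCnt mc hero)]) []
        (fun acc hero _ => hbody acc hero)]
  rw [PySem.List.foldl_append_singleton_eq_map]
  simp

-- ---- B side ----

-- the pointer loop advances exactly to pvCnt, accumulating the matching coin sum
lemma altWhile_run (pairs : List (Int × Int)) (hp : pairs.Pairwise (fun a b => a.1 ≤ b.1))
    (h : Int) :
    ∀ (d j : Nat), pvCnt pairs h - j ≤ d → j ≤ pvCnt pairs h →
    altWhile pairs h d j (pvS pairs j) = (pvCnt pairs h, pvS pairs (pvCnt pairs h)) := by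
  intro d
  have hchar := pvCnt_char pairs hp h
  have hcle := pvCnt_le_length pairs h
  induction d with
  | zero =>
    intro j hd hj
    have hje : j = pvCnt pairs h := by omega
    rw [show altWhile pairs h 0 j (pvS pairs j) = (j, pvS pairs j) from rfl, hje]
  | succ d ih =>
    intro j hd hj
    by_cases hje : j = pvCnt pairs h
    · simp only [altWhile]
      by_cases hjl : j < pairs.length
      · have hcon : ¬ ((pairs[j]'hjl).1 ≤ h) := by
          intro hc
          have := (hchar j hjl).mp hc
          omega
        rw [dif_pos hjl, if_neg hcon, hje]
      · rw [dif_neg hjl, hje]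
    · have hjlt : j < pvCnt pairs h := by omega
      have hjl : j < pairs.length := by omega
      simp only [altWhile]
      rw [dif_pos hjl, if_pos ((hchar j hjl).mpr hjlt)]
      rw [← pvS_succ pairs j hjl]
      exact ih (j + 1) (by omega) (by omega)

-- the sweep is the pure scatter of per-hero answers into the result list
lemma sweep_run (pairs : List (Int × Int)) (hp : pairs.Pairwise (fun a b => a.1 ≤ b.1)) :
    ∀ (hl : List (Int × Int)) (res : List Int) (j : Nat) (acc : Int),
    acc = pvS pairs j →
    hl.Pairwise (fun a b => a.1 ≤ b.1) →
    (∀ p ∈ hl, j ≤ pvCnt pairs p.1) →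
    (∀ p ∈ hl, 0 ≤ p.2 ∧ p.2.toNat < res.length) →
    (hl.foldl (fun st hi =>
        let w := altWhile pairs hi.1 (pairs.length - st.2.1) st.2.1 st.2.2
        (PySem.List.pySetD st.1 hi.2 w.2, w.1, w.2)) (res, j, acc)).1 =
      hl.foldl (fun r p => r.set p.2.toNat (pvS pairs (pvCnt pairs p.1))) res := by
  intro hl
  induction hl with
  | nil => intro res j acc _ _ _ _; simp
  | cons p t ih =>
    intro res j acc hacc hpw hjle hidx
    subst hacc
    rw [List.pairwise_cons] at hpw
    obtain ⟨hpt, hpw'⟩ := hpw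
    have hjp : j ≤ pvCnt pairs p.1 := hjle p List.mem_cons_self
    have hw := altWhile_run pairs hp p.1 (pairs.length - j) j
      (by have := pvCnt_le_length pairs p.1; omega) hjp
    simp only [List.foldl_cons, hw]
    have hset : PySem.List.pySetD res p.2 (pvS pairs (pvCnt pairs p.1)) =
        res.set p.2.toNat (pvS pairs (pvCnt pairs p.1)) := by
      obtain ⟨h0, hlt⟩ := hidx p List.mem_cons_self
      have h2 : p.2 < (res.length : Int) := by omega
      simp [PySem.List.pySetD, PySem.List.pySet?, PySem.List.pyIdx?, h0, h2]
    rw [hset]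
    apply ih
    · rfl
    · exact hpw'
    · intro q hq
      exact le_trans (pvCnt_mono pairs (hpt q hq)) (le_refl _)
    · intro q hq
      obtain ⟨h0, hlt⟩ := hidx q (List.mem_cons_of_mem _ hq)
      exact ⟨h0, by simpa using hlt⟩

-- scatter: positions not named stay, each named position gets its value (indices distinct)
lemma setfold_length (hl : List (Int × Int)) (f : Int × Int → Int) (res : List Int) :
    (hl.foldl (fun r p => r.set p.2.toNat (f p)) res).length = res.length := by
  induction hl generalizing res with
  | nil => simp
  | cons p t ih => simp [ih]

lemma setfold_not_mem (hl : List (Int × Int)) (f : Int × Int → Int) (res : List Int)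
    (i : Nat) (hi : ∀ p ∈ hl, p.2.toNat ≠ i)
    (hilen : i < (hl.foldl (fun r p => r.set p.2.toNat (f p)) res).length) :
    (hl.foldl (fun r p => r.set p.2.toNat (f p)) res)[i] =
      res[i]'(by rw [setfold_length] at hilen; exact hilen) := by
  induction hl generalizing res with
  | nil => simp
  | cons p t ih =>
    simp only [List.foldl_cons]
    rw [ih _ (fun q hq => hi q (List.mem_cons_of_mem _ hq))]
    exact List.getElem_set_ne (hi p List.mem_cons_self) _
    
lemma setfold_mem (hl : List (Int × Int)) (f : Int × Int → Int) (res : List Int)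
    (hnd : (hl.map Prod.snd).Nodup) (hnn : ∀ q ∈ hl, 0 ≤ q.2) (p : Int × Int) (hmem : p ∈ hl)
    (hplen : p.2.toNat < res.length) :
    (hl.foldl (fun r q => r.set q.2.toNat (f q)) res)[p.2.toNat]'(by
      rw [setfold_length]; exact hplen) = f p := by
  induction hl generalizing res with
  | nil => simp at hmem
  | cons q t ih =>
    simp only [List.map_cons, List.nodup_cons] at hnd
    obtain ⟨hq2, hnd'⟩ := hnd
    simp only [List.foldl_cons]
    rcases List.mem_cons.mp hmem with rfl | hmt
    · have hne2 : ∀ r ∈ t, r.2.toNat ≠ p.2.toNat := by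
        intro r hr hcon
        have h0r : 0 ≤ r.2 := hnn r (List.mem_cons_of_mem _ hr)
        have h0p : 0 ≤ p.2 := hnn p List.mem_cons_self
        have hreq : r.2 = p.2 := by omega
        exact hq2 (List.mem_map.mpr ⟨r, hr, hreq⟩)
      rw [setfold_not_mem t f _ p.2.toNat hne2 (by rw [setfold_length]; simpa using hplen)]
      exact List.getElem_set_self _
    · exact ih _ hnd' (fun r hr => hnn r (List.mem_cons_of_mem _ hr)) hmt
        (by simpa using hplen)

-- B scatters by original index: the result at position i is the answer for heroes[i]
lemma b_eq_map (heroes monsters coins : List Int) :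
    maximumCoins_alt heroes monsters coins =
      heroes.map (fun h =>
        pvS (PySem.List.sorted (monsters.zip coins) (fun p => p.1) false)
          (pvCnt (PySem.List.sorted (monsters.zip coins) (fun p => p.1) false) h)) := by
  unfold maximumCoins_alt
  simp only []
  set pairs := PySem.List.sorted (monsters.zip coins) (fun p => p.1) false with hpairs
  have hp : pairs.Pairwise (fun a b => a.1 ≤ b.1) := PySem.List.sorted_pairwise _ _
  set hl := PySem.List.sorted ((PySem.List.enumerate heroes 0).map (fun p => (p.2, p.1)))
    (fun t => t.1) false with hhl
  have hhlmem : ∀ p ∈ hl, 0 ≤ p.2 ∧ p.2.toNat < heroes.length ∧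
      heroes[p.2.toNat]? = some p.1 := by
    intro p hmem
    rw [hhl, PySem.List.mem_sorted] at hmem
    obtain ⟨q, hq, rfl⟩ := List.mem_map.mp hmem
    rw [PySem.List.enumerate_eq_map_pyRange heroes 0] at hq
    obtain ⟨j, hj, rfl⟩ := List.mem_map.mp hq
    rw [PySem.List.mem_pyRange_one] at hj
    simp only [PySem.List.len_eq] at hj
    refine ⟨by omega, by omega, ?_⟩
    rw [PySem.List.pyGetD_eq_getElem heroes 0 (by omega) (by omega)]
    rw [List.getElem?_eq_getElem (by omega)]
  rw [sweep_run pairs hp hl (List.replicate heroes.length 0) 0 0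
      (by unfold pvS; simp)
      (PySem.List.sorted_pairwise _ _)
      (fun p _ => Nat.zero_le _)
      (fun p hmem => ⟨(hhlmem p hmem).1, by
        rw [List.length_replicate]; exact (hhlmem p hmem).2.1⟩)]
  -- now evaluate the pure scatter
  have hnd : (hl.map Prod.snd).Nodup := by
    have hperm : hl.Perm ((PySem.List.enumerate heroes 0).map (fun p => (p.2, p.1))) :=
      PySem.List.sorted_perm _ _ _
    have hperm2 := hperm.map Prod.snd
    apply hperm2.nodup_iff.mpr
    rw [List.map_map]
    have : (Prod.snd ∘ fun p : Int × Int => (p.2, p.1)) = Prod.fst := rfl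
    rw [this, PySem.List.map_fst_enumerate]
    exact PySem.List.nodup_pyRange_one _ _
  have hnn : ∀ p ∈ hl, 0 ≤ p.2 := fun p hmem => (hhlmem p hmem).1
  apply List.ext_getElem
  · rw [setfold_length]; simp
  · intro i h1 h2
    have hilen : i < heroes.length := by simpa using h2
    have hmem : ((heroes[i], (i : Int)) : Int × Int) ∈ hl := by
      rw [hhl, PySem.List.mem_sorted]
      apply List.mem_map.mpr
      refine ⟨((i : Int), heroes[i]), ?_, rfl⟩
      rw [PySem.List.enumerate_eq_map_pyRange heroes 0]
      apply List.mem_map.mpr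
      refine ⟨(i : Int), ?_, ?_⟩
      · rw [PySem.List.mem_pyRange_one]
        simp only [PySem.List.len_eq]
        omega
      · rw [PySem.List.pyGetD_eq_getElem heroes 0 (by omega) (by omega)]
        simp
    have := setfold_mem hl (fun p => pvS pairs (pvCnt pairs p.1))
      (List.replicate heroes.length 0) hnd hnn ((heroes[i], (i : Int)))
      hmem (by simp; omega)
    simp only [Int.toNat_natCast] at this
    rw [List.getElem_map]
    exact this

-- ===== VERDICT (by name: the statement is the Claim_ definition above) =====
theorem maximumCoins_spec : Claim_equal_maximumCoins := by
  intro heroes monsters coins _ hpre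
  obtain ⟨hne, hlen⟩ := hpre
  unfold Spec_maximumCoins
  rw [a_eq_map heroes monsters coins hne hlen, b_eq_map heroes monsters coins]
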